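-- pv_equiv track=rewrite | github.com/wpgrant/aoc | 2020/6b.py | processGroup
-- ===== SOURCE A (Python) =====
-- def processGroup(groupLines):
--   groupList = []
--   # Initialize with first line
--   for char in groupLines[0]:
--     if char != '\n':
--       groupList.append(char)
--   # Iterate over the rest, and remove any chars that don't remain
--   for line in groupLines[1:]:
--     groupList = [char for char in groupList if line.find(char) >= 0]
--   return len(set(groupList))
-- ===== SOURCE B (Python) =====
-- def processGroup(groupLines):
--   n = len(groupLines)
--   counts = {}
--   for line in groupLines:
--     for char in set(line):
--       counts[char] = counts.get(char, 0) + 1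
--   return sum(1 for char, k in counts.items() if k == n and char != '\n')
-- ===== Notes on version B (the rewrite author's own statement) =====
-- stated objective: alternative
-- what changed: Replaces A's progressive intersection (seed with the first line's non-newline chars, then filter the survivor list against each later line via str.find) by a single frequency-table pass: a dict counts each distinct character once per line, and the result is the number of non-newline characters whose count equals the number of lines.
import Mathlib
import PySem

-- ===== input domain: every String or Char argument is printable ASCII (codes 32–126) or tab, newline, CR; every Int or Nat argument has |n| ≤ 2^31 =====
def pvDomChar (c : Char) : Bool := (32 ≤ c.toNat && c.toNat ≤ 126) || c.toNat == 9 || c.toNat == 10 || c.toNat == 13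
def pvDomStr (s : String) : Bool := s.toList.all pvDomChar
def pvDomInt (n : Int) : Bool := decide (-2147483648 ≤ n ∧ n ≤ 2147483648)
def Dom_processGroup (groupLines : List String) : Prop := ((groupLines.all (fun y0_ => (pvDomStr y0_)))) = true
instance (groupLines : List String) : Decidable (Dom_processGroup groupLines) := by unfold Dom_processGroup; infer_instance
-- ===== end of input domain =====

-- B replaces A's progressive intersection of the first line with each later line by a single
-- frequency-table pass (count, per line, each distinct character once) followed by a filtering
-- count of the characters seen in every line; objective: alternative decomposition, same cost.

-- ===== PORT A =====
def processGroup (groupLines : List String) : Int :=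
  -- groupLines[0] raises IndexError on []; excluded by Pre_ below (the .getD "" is never
  -- reached on admitted inputs)
  let groupList : List Char :=
    ((PySem.List.pyGet? groupLines 0).getD "").toList.foldl
      (fun acc c => if c != '\n' then acc ++ [c] else acc) []
  let groupList : List Char :=
    (PySem.List.slice groupLines (some 1) none).foldl
      (fun gl line => gl.filter (fun c => decide (0 ≤ PySem.Str.find line (String.ofList [c])))) groupList
  ((PySem.Set.ofList groupList).length : Int)

-- ===== PORT B =====
def processGroup_alt (groupLines : List String) : Int :=
  let n : Int := groupLines.length
  let counts : PySem.Dict Char Int :=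
    groupLines.foldl
      (fun cnt line =>
        (PySem.Set.ofList line.toList).foldl
          (fun cnt c => cnt.insert c (cnt.getD c 0 + 1)) cnt)
      PySem.Dict.empty
  (counts.items.map (fun p => if p.2 == n && p.1 != '\n' then (1 : Int) else 0)).sum

-- ===== PRECONDITION & SPEC =====
-- Pre_ excludes only the empty list, on which A raises IndexError (groupLines[0]).
def Pre_processGroup (groupLines : List String) : Prop := groupLines ≠ []
instance (groupLines : List String) : Decidable (Pre_processGroup groupLines) := by
  unfold Pre_processGroup; infer_instance
def pvWitness_processGroup : List String := ["ab", "b"]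

def Spec_processGroup (groupLines : List String) (out : Int) : Prop := out = processGroup_alt groupLines
instance (groupLines : List String) (out : Int) : Decidable (Spec_processGroup groupLines out) := by unfold Spec_processGroup; infer_instance

-- ===== CLAIM (what is proved, stated in full; the proofs are below) =====
def Claim_equal_processGroup : Prop := ∀ (groupLines : List String), Dom_processGroup groupLines → Pre_processGroup groupLines → Spec_processGroup groupLines (processGroup groupLines)

-- ===== LEMMAS AND PROOFS =====

-- A's second loop: folding `filter` over the lines filters once by the conjunction.
theorem foldl_filter_all (p : String → Char → Bool) (ls : List String) (gl : List Char) :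
    ls.foldl (fun gl line => gl.filter (p line)) gl
      = gl.filter (fun c => ls.all (fun line => p line c)) := by
  induction ls generalizing gl with
  | nil => simp
  | cons l ls ih =>
      simp only [List.foldl_cons, ih, List.filter_filter, List.all_cons]
      exact List.filter_congr (fun c _ => by
        cases h1 : p l c <;> cases h2 : ls.all (fun line => p line c) <;> simp)

-- counting in the flattened per-line distinct-character lists counts the lines containing c
theorem count_flat_distinct (ls : List String) (c : Char) :
    List.count c (ls.flatMap (fun line => PySem.Set.ofList line.toList))
      = List.countP (fun line => decide (c ∈ line.toList)) ls := by
  induction ls with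
  | nil => simp
  | cons l ls ih =>
      rw [List.flatMap_cons, List.count_append, ih, List.countP_cons]
      by_cases h : c ∈ l.toList
      · rw [List.count_eq_one_of_mem (PySem.Set.nodup_ofList _)
            ((PySem.Set.mem_ofList _ _).mpr h)]
        simp [h, Nat.add_comm]
      · rw [List.count_eq_zero.mpr (fun hm => h ((PySem.Set.mem_ofList _ _).mp hm))]
        simp [h]

theorem processGroup_eq_core (l0 : String) (rest : List String) :
    processGroup (l0 :: rest) = processGroup_alt (l0 :: rest) := by
  unfold processGroup processGroup_alt
  simp only [← List.foldl_flatMap, PySem.Dict.foldl_insert_getD_add_one_eq_counter,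
    PySem.Dict.items_counter, List.map_map]
  rw [show (PySem.List.pyGet? (l0 :: rest) 0).getD "" = l0 from by
        simp [PySem.List.pyGet?, PySem.List.pyIdx?],
      PySem.List.slice_from (l0 :: rest) (by norm_num : (0:Int) ≤ 1)]
  simp only [Int.toNat_one, List.drop_one, List.tail_cons]
  rw [show List.foldl (fun acc c => if (c != '\n') = true then acc ++ [c] else acc) [] l0.toList
        = List.filter (fun c => c != '\n') l0.toList from by
        simpa using PySem.List.foldl_append_if (fun c => c != '\n') id l0.toList [],
      foldl_filter_all (fun line c => decide (0 ≤ PySem.Str.find line (String.ofList [c])))]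
  simp only [Function.comp_def, PySem.List.sum_map_ite_one_zero]
  rw [Int.ofNat_inj]
  -- both sides are lengths of nodup lists with the same members
  rw [List.countP_eq_length_filter]
  apply List.Perm.length_eq
  apply (List.perm_ext_iff_of_nodup (PySem.Set.nodup_ofList _)
    ((PySem.Set.nodup_ofList _).filter _)).mpr
  intro c
  set ls := l0 :: rest with hls
  have hflat : ∀ d : Char,
      d ∈ ls.flatMap (fun line => PySem.Set.ofList line.toList) ↔ ∃ line ∈ ls, d ∈ line.toList := by
    intro d
    simp only [List.mem_flatMap, PySem.Set.mem_ofList]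
  constructor
  · intro hc
    rw [PySem.Set.mem_ofList] at hc
    have hm0 : c ∈ (l0.toList.filter (fun c => c != '\n')) := List.mem_filter.mp hc |>.1
    have hne : c ≠ '\n' := by
      have := (List.mem_filter.mp hm0).2
      simpa using this
    have hm0' : c ∈ l0.toList := List.mem_filter.mp hm0 |>.1
    have hall : ∀ line ∈ rest, c ∈ line.toList := by
      intro line hline
      have := (List.mem_filter.mp hc).2
      simp only [List.all_eq_true, decide_eq_true_eq] at this
      have hfind := this line hline
      have : (String.ofList [c]).toList <:+: line.toList := by
        have := (PySem.Str.find_nonneg_iff line (String.ofList [c])).mp hfind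
        exact this
      simpa [List.singleton_infix_iff] using this
    have hmemall : ∀ line ∈ ls, c ∈ line.toList := by
      intro line hline
      rcases List.mem_cons.mp hline with h | h
      · subst h; exact hm0'
      · exact hall line h
    rw [List.mem_filter]
    refine ⟨(PySem.Set.mem_ofList _ _).mpr ((hflat c).mpr ⟨l0, by simp [hls], hm0'⟩), ?_⟩
    have hcount : List.countP (fun line => decide (c ∈ line.toList)) ls = ls.length :=
      List.countP_eq_length.mpr (fun line hline => decide_eq_true (hmemall line hline))
    simp [count_flat_distinct, hcount, hne]
  · intro hc
    rw [List.mem_filter] at hc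
    obtain ⟨hmem, hp⟩ := hc
    simp only [beq_iff_eq, Bool.and_eq_true, bne_iff_ne, ne_eq] at hp
    obtain ⟨hcnt, hne⟩ := hp
    rw [count_flat_distinct] at hcnt
    have hcnt' : List.countP (fun line => decide (c ∈ line.toList)) ls = ls.length := by
      exact_mod_cast hcnt
    have hmemall := List.countP_eq_length.mp hcnt'
    have hm0 : c ∈ l0.toList := by
      simpa using hmemall l0 (by simp [hls])
    rw [PySem.Set.mem_ofList, List.mem_filter, List.mem_filter]
    refine ⟨⟨hm0, by simpa using hne⟩, ?_⟩
    simp only [List.all_eq_true, decide_eq_true_eq]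
    intro line hline
    have hmem' : c ∈ line.toList := by
      simpa using hmemall line (by simp [hls, hline])
    rw [PySem.Str.find_nonneg_iff]
    simpa [List.singleton_infix_iff] using hmem'

-- ===== VERDICT (by name: the statement is the Claim_ definition above) =====
theorem processGroup_spec : Claim_equal_processGroup := by
  intro groupLines _ hpre
  cases groupLines with
  | nil => exact absurd rfl hpre
  | cons l0 rest => exact processGroup_eq_core l0 rest
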